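-- pv_equiv track=rewrite | github.com/TeeKhekHeng/Class | Lab Test 1/Palin.py | analyze_string
-- ===== SOURCE A (Python) =====
-- def analyze_string(input_str):
--     """Analyze the given string."""
--     total_characters = 0
--     uppercase_count = 0
--     lowercase_count = 0
--     digit_count = 0
--     is_palindrome = False # Initialize as False
--
--     for char in input_str:
--         total_characters += 1
--         if char.isupper():
--             uppercase_count += 1
--         elif char.isdigit():
--             digit_count += 1
--         # Modification 1 = Addition of method of extracting the lowercase letters from the given string by using the char.islower()
--         # and insert into the variable "lowercase_count" in the "elif" statement below.
--         # Reason = The original program is lack of the function that display the number of lowercase letters.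
--         elif char.islower():
--             lowercase_count += 1
--
--      # Corrected palindrome check
--     reversed_str = input_str[::-1]
--     # Modification 2 = Changing from "!=" to "==" in the if statement below.
--     # Reason = The palindrome check is detecting whether the reversed letters is same as the original letters, if same then the program
--     # will write "True" in the output. Hence, the method of detecting same in if-else statement is written as "==" and not "!=".
--     if reversed_str.lower() == input_str.lower():
--         is_palindrome = True
--     return total_characters, uppercase_count, lowercase_count, digit_count,is_palindrome
-- ===== SOURCE B (Python) =====
-- def analyze_string(input_str):
--     """Analyze the given string."""
--     total_characters = len(input_str)
--     uppercase_count = sum(1 for c in input_str if c.isupper())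
--     lowercase_count = sum(1 for c in input_str if c.islower())
--     digit_count = sum(1 for c in input_str if c.isdigit())
--     s = input_str.lower()
--     is_palindrome = all(s[i] == s[-1 - i] for i in range(len(s) // 2))
--     return total_characters, uppercase_count, lowercase_count, digit_count, is_palindrome
-- ===== Notes on version B (the rewrite author's own statement) =====
-- stated objective: idiomatic
-- what changed: Replaces the single if/elif counting loop by len() plus three independent generator-sum counts, and replaces building the reversed string and comparing whole strings by a short-circuiting two-pointer scan over the lowercased string.
import Mathlib
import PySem

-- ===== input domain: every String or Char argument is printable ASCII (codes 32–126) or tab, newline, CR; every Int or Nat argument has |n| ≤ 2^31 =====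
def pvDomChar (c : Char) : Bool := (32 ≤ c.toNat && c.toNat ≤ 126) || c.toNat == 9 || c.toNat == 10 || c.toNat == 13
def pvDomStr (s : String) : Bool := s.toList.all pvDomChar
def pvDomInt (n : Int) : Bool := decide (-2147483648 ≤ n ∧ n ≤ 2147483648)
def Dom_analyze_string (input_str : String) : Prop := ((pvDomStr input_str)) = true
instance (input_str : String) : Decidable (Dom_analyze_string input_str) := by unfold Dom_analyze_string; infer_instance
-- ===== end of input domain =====

-- B replaces the if/elif counting loop by len() plus three independent countP passes and the
-- reversed-string comparison by a two-pointer half-scan over the lowercased string (idiomatic).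

-- ===== PORT A =====
def analyze_string (input_str : String) : Int × Int × Int × Int × Bool :=
  let cs := input_str.toList
  -- the counting for-loop, state (total, upper, lower, digit)
  let st : Int × Int × Int × Int := cs.foldl (fun st c =>
    let (t, u, l, d) := st
    if PySem.Chars.isupper c then (t + 1, u + 1, l, d)
    else if PySem.Chars.isdigit c then (t + 1, u, l, d + 1)
    else if PySem.Chars.islower c then (t + 1, u, l + 1, d)
    else (t + 1, u, l, d)) (0, 0, 0, 0)
  -- reversed_str = input_str[::-1]  (slice? _ none none (-1) = reverse, PySem.Chars.slice?_none_none_neg_one)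
  let reversed_str := cs.reverse
  let is_palindrome :=
    if PySem.Chars.lower reversed_str = PySem.Chars.lower cs then true else false
  (st.1, st.2.1, st.2.2.1, st.2.2.2, is_palindrome)

-- ===== PORT B =====
def analyze_string_alt (input_str : String) : Int × Int × Int × Int × Bool :=
  let cs := input_str.toList
  let total : Int := cs.length
  let upper : Int := cs.countP (fun c => PySem.Chars.isupper c)
  let lower : Int := cs.countP (fun c => PySem.Chars.islower c)
  let digit : Int := cs.countP (fun c => PySem.Chars.isdigit c)
  let s := PySem.Chars.lower cs
  let pal := (List.range (s.length / 2)).all (fun i =>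
    PySem.List.pyGet? s (i : Int) == PySem.List.pyGet? s (-1 - (i : Int)))
  (total, upper, lower, digit, pal)

-- ===== PRECONDITION & SPEC =====
def Spec_analyze_string (input_str : String) (out : Int × Int × Int × Int × Bool) : Prop := out = analyze_string_alt input_str
instance (input_str : String) (out : Int × Int × Int × Int × Bool) : Decidable (Spec_analyze_string input_str out) := by unfold Spec_analyze_string; infer_instance

-- ===== CLAIM (what is proved, stated in full; the proofs are below) =====
def Claim_equal_analyze_string : Prop := ∀ (input_str : String), Dom_analyze_string input_str → Spec_analyze_string input_str (analyze_string input_str)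

-- ===== LEMMAS AND PROOFS =====

-- the counting fold computes (len, countP isupper, countP islower, countP isdigit)
theorem pv_fold_counts (cs : List Char) (t u l d : Int) :
    cs.foldl (fun st c =>
      let (t, u, l, d) := st
      if PySem.Chars.isupper c then (t + 1, u + 1, l, d)
      else if PySem.Chars.isdigit c then (t + 1, u, l, d + 1)
      else if PySem.Chars.islower c then (t + 1, u, l + 1, d)
      else (t + 1, u, l, d)) (t, u, l, d)
    = (t + cs.length, u + cs.countP (fun c => PySem.Chars.isupper c),
       l + cs.countP (fun c => PySem.Chars.islower c),
       d + cs.countP (fun c => PySem.Chars.isdigit c)) := by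
  induction cs generalizing t u l d with
  | nil => simp
  | cons c cs ih =>
    have hud : PySem.Chars.isupper c → ¬ PySem.Chars.isdigit c := by
      simp [PySem.Chars.isupper, PySem.Chars.isdigit, Char.le_def, UInt32.le_iff_toNat_le]
      omega
    have hul : PySem.Chars.isupper c → ¬ PySem.Chars.islower c := by
      simp [PySem.Chars.isupper, PySem.Chars.islower, Char.le_def, UInt32.le_iff_toNat_le]
      omega
    have hdl : PySem.Chars.isdigit c → ¬ PySem.Chars.islower c := by
      simp [PySem.Chars.isdigit, PySem.Chars.islower, Char.le_def, UInt32.le_iff_toNat_le]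
      omega
    by_cases hu : PySem.Chars.isupper c
    · simp only [List.foldl_cons, ih, List.countP_cons, List.length_cons,
        if_neg (hud hu), if_neg (hul hu), hu, Prod.mk.injEq]
      push_cast
      omega
    · by_cases hd : PySem.Chars.isdigit c
      · simp only [List.foldl_cons, ih, List.countP_cons,
          List.length_cons, if_neg (hdl hd), hu, hd,
          Prod.mk.injEq]
        push_cast
        omega
      · by_cases hl : PySem.Chars.islower c
        · simp only [List.foldl_cons, ih,
            List.countP_cons, List.length_cons, hu, hd, hl,
            Prod.mk.injEq]
          push_cast
          omega
        · simp only [List.foldl_cons, ih,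
            List.countP_cons, List.length_cons, hu, hd, hl,
            Prod.mk.injEq]
          push_cast
          omega

-- s[-1-i] for 0 <= i < len s is s[len-1-i]
theorem pv_pyGet_neg (s : List Char) (i : Nat) (h : i < s.length) :
    PySem.List.pyGet? s (-1 - (i : Int)) = s[s.length - 1 - i]? := by
  simp only [PySem.List.pyGet?, PySem.List.pyIdx?]
  rw [if_neg (by omega), if_pos (by omega)]
  simp only [Option.bind_some]
  congr 1
  omega

-- the two-pointer half-scan equals the reverse comparison
theorem pv_pal_half (s : List Char) :
    ((List.range (s.length / 2)).all (fun i =>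
      PySem.List.pyGet? s (i : Int) == PySem.List.pyGet? s (-1 - (i : Int))))
    = decide (s.reverse = s) := by
  rw [Bool.eq_iff_iff, List.all_eq_true, decide_eq_true_eq]
  constructor
  · intro hall
    apply List.ext_getElem?
    intro i
    have key : ∀ j, j < s.length / 2 → s[j]? = s[s.length - 1 - j]? := by
      intro j hj
      have hjlt : j < s.length := by omega
      have h := hall j (List.mem_range.mpr hj)
      rw [beq_iff_eq, PySem.List.pyGet?_natCast, pv_pyGet_neg s j hjlt] at h
      exact h
    by_cases hi : i < s.length
    · rw [List.getElem?_reverse hi]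
      by_cases h2 : i < s.length / 2
      · exact (key i h2).symm
      · by_cases h3 : s.length - 1 - i < s.length / 2
        · have h4 := key (s.length - 1 - i) h3
          rw [show s.length - 1 - (s.length - 1 - i) = i by omega] at h4
          exact h4
        · rw [show s.length - 1 - i = i by omega]
    · rw [List.getElem?_eq_none (by simp; omega),
          List.getElem?_eq_none (by omega)]
  · intro hrev i hi
    rw [List.mem_range] at hi
    have hlt : i < s.length := by omega
    rw [beq_iff_eq, PySem.List.pyGet?_natCast, pv_pyGet_neg s i hlt]
    have h := List.getElem?_reverse (l := s) hlt
    rw [hrev] at h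
    exact h

-- ===== VERDICT (by name: the statement is the Claim_ definition above) =====
theorem analyze_string_spec : Claim_equal_analyze_string := by
  intro input_str _
  unfold Spec_analyze_string
  show analyze_string input_str = analyze_string_alt input_str
  simp only [analyze_string, analyze_string_alt, pv_fold_counts, zero_add]
  rw [pv_pal_half]
  have hlen : (PySem.Chars.lower input_str.toList).length = input_str.toList.length := by
    simp [PySem.Chars.lower]
  have hrev : PySem.Chars.lower input_str.toList.reverse
      = (PySem.Chars.lower input_str.toList).reverse := by
    simp [PySem.Chars.lower]
  rw [hrev]
  by_cases h : (PySem.Chars.lower input_str.toList).reverse = PySem.Chars.lower input_str.toList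
  · simp [h]
  · simp [h]
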